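-- pv_equiv track=rewrite | github.com/palsure/StreamMind-LiveQA | VAR/demo/backend/vlm_engine.py | _rank_by_frequency
-- ===== SOURCE A (Python) =====
-- def _rank_by_frequency(items: list[str]) -> list[str]:
--     """Return unique items sorted by frequency (most common first)."""
--     from collections import Counter
--     counts = Counter(items)
--     seen = set()
--     ranked = []
--     for item, _ in counts.most_common():
--         if item not in seen:
--             seen.add(item)
--             ranked.append(item)
--     return ranked
-- ===== SOURCE B (Python) =====
-- def _rank_by_frequency(items: list[str]) -> list[str]:
--     """Return unique items sorted by frequency (most common first).
--
--     Bucket approach: group items by their count, then walk counts from the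
--     maximum down to 1 — no comparison sort."""
--     counts = {}
--     for x in items:
--         counts[x] = counts.get(x, 0) + 1
--     if not counts:
--         return []
--     buckets = {}
--     for item, c in counts.items():
--         buckets.setdefault(c, []).append(item)
--     maxc = max(counts.values())
--     ranked = []
--     for c in range(maxc, 0, -1):
--         ranked.extend(buckets.get(c, []))
--     return ranked
-- ===== Notes on version B (the rewrite author's own statement) =====
-- stated objective: alternative
-- what changed: Replaces Counter.most_common's comparison sort by a bucket pass: group unique items by their count in first-appearance order, then emit buckets from the maximum count down to 1.
import Mathlib
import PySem

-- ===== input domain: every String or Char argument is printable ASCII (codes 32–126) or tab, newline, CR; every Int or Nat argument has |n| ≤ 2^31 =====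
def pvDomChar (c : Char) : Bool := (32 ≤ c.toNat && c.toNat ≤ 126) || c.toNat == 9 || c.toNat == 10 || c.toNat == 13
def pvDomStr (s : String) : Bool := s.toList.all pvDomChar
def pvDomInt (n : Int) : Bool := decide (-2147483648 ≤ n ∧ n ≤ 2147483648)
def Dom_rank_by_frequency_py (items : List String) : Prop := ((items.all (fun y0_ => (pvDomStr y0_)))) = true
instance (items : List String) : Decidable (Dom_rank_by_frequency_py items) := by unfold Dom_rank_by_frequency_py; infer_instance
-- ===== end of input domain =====

-- B replaces Counter.most_common's comparison sort by a bucket pass over counts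
-- (group items by count, emit buckets from the max count down): alternative algorithm, same output.

-- ===== PORT A =====
-- counts = Counter(items); for item, _ in counts.most_common(): if item not in seen: seen.add(item); ranked.append(item)
def rank_by_frequency_py (items : List String) : List String :=
  let counts := PySem.Dict.counter items
  ((PySem.List.sorted counts.items (fun kv => kv.2) true).foldl
    (fun (p : PySem.Set String × List String) kv =>
      if p.1.contains kv.1 then p else (p.1.add kv.1, p.2 ++ [kv.1]))
    (PySem.Set.empty, [])).2

-- ===== PORT B =====
def rank_by_frequency_py_alt (items : List String) : List String :=
  let counts := items.foldl (fun d x => d.insert x (d.getD x 0 + 1)) PySem.Dict.empty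
  if counts.items = [] then []
  else
    -- buckets.setdefault(c, []).append(item)
    let buckets := counts.items.foldl
      (fun (d : PySem.Dict Int (List String)) p => d.modify p.2 [] (fun l => l ++ [p.1]))
      PySem.Dict.empty
    -- max(counts.values()); the `none` branch is unreachable (counts is nonempty here)
    let maxc := match PySem.List.max? counts.values (fun v => v) with
      | some m => m
      | none => 0
    (PySem.List.pyRange maxc 0 (-1)).foldl (fun acc c => acc ++ buckets.getD c []) []

-- ===== PRECONDITION & SPEC =====
def Spec_rank_by_frequency_py (items : List String) (out : List String) : Prop := out = rank_by_frequency_py_alt items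
instance (items : List String) (out : List String) : Decidable (Spec_rank_by_frequency_py items out) := by unfold Spec_rank_by_frequency_py; infer_instance

-- ===== CLAIM (what is proved, stated in full; the proofs are below) =====
def Claim_equal_rank_by_frequency_py : Prop := ∀ (items : List String), Dom_rank_by_frequency_py items → Spec_rank_by_frequency_py items (rank_by_frequency_py items)

-- ===== LEMMAS AND PROOFS =====

theorem insertBy_append_left {α : Type} (before : α → α → Bool) (x : α) (ys zs : List α)
    (h : ∀ y ∈ ys, before x y = false) :
    PySem.List.insertBy before x (ys ++ zs) = ys ++ PySem.List.insertBy before x zs := by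
  induction ys with
  | nil => simp
  | cons y ys ih =>
    have hy : before x y = false := h y (by simp)
    rw [List.cons_append,
      show PySem.List.insertBy before x (y :: (ys ++ zs))
          = y :: PySem.List.insertBy before x (ys ++ zs) by simp [PySem.List.insertBy, hy],
      ih (fun y' hy' => h y' (by simp [hy']))]
    simp

theorem sorted_rev_snoc {α : Type} (l : List α) (x : α) (key : α → Int) :
    PySem.List.sorted (l ++ [x]) key true
      = PySem.List.insertBy (fun a b => decide (key b < key a)) x (PySem.List.sorted l key true) := by
  rw [PySem.List.sorted_rev_eq_foldl_insertBy, PySem.List.sorted_rev_eq_foldl_insertBy,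
    List.foldl_append]
  simp

theorem sorted_rev_split {α : Type} (l : List α) (key : α → Int) (a : Int)
    (h : ∀ p ∈ l, key p ≤ a) :
    PySem.List.sorted l key true
      = l.filter (fun p => key p == a)
        ++ PySem.List.sorted (l.filter (fun p => !(key p == a))) key true := by
  induction l using List.reverseRecOn with
  | nil => simp [PySem.List.sorted]
  | append_singleton l x ih =>
    have hx : key x ≤ a := h x (by simp)
    have hl : ∀ p ∈ l, key p ≤ a := fun p hp => h p (by simp [hp])
    rw [sorted_rev_snoc, ih hl]
    by_cases hxa : key x = a
    · -- x belongs to the top bucket: it slides past the bucket and lands at its end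
      rw [insertBy_append_left _ _ _ _ (by
        intro y hy
        have : key y = a := by simpa using (List.of_mem_filter hy)
        simp [this, hxa])]
      have hrest : ∀ z ∈ PySem.List.sorted (l.filter (fun p => !(key p == a))) key true,
          key z < key x := by
        intro z hz
        rw [PySem.List.mem_sorted] at hz
        have h1 := List.of_mem_filter hz
        have h2 := hl z (List.mem_of_mem_filter hz)
        simp at h1
        omega
      cases hS : PySem.List.sorted (l.filter (fun p => !(key p == a))) key true with
      | nil =>
        simp [PySem.List.insertBy, hxa, hS]
      | cons z zs =>
        have hz : key z < key x := hrest z (by rw [hS]; simp)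
        simp only [PySem.List.insertBy]
        rw [if_pos (by simpa using hz)]
        simp [hxa, ← hS]
    · -- key x < a: x passes only the top bucket, then is inserted into the rest
      have hxlt : key x < a := lt_of_le_of_ne hx hxa
      rw [insertBy_append_left _ _ _ _ (by
        intro y hy
        have : key y = a := by simpa using (List.of_mem_filter hy)
        simp [this]; omega)]
      rw [← sorted_rev_snoc]
      simp [List.filter_append, hxa]

theorem sorted_rev_bucket_aux {α : Type} (key : α → Int) (b : Int) :
    ∀ (n : Nat) (a : Int) (l : List α), (a - b).toNat ≤ n →
      (∀ p ∈ l, b < key p ∧ key p ≤ a) →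
      PySem.List.sorted l key true
        = (PySem.List.pyRange a b (-1)).flatMap (fun c => l.filter (fun p => key p == c)) := by
  intro n
  induction n with
  | zero =>
    intro a l hn h
    have hab : a ≤ b := by omega
    cases l with
    | nil => simp [PySem.List.sorted, PySem.List.pyRange_neg_one_eq_nil hab]
    | cons p t =>
      have := h p (by simp)
      omega
  | succ n ih =>
    intro a l hn h
    by_cases hab : a ≤ b
    · cases l with
      | nil => simp [PySem.List.sorted, PySem.List.pyRange_neg_one_eq_nil hab]
      | cons p t =>
        have := h p (by simp)
        omega
    · have hba : b < a := by omega
      rw [PySem.List.pyRange_neg_one_cons hba, List.flatMap_cons]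
      rw [sorted_rev_split l key a (fun p hp => (h p hp).2)]
      congr 1
      rw [ih (a - 1) (l.filter (fun p => !(key p == a))) (by omega) (by
        intro p hp
        have h1 := List.of_mem_filter hp
        have h2 := h p (List.mem_of_mem_filter hp)
        simp at h1
        omega)]
      apply List.flatMap_congr
      intro c hc
      have hca : c < a := by
        have := PySem.List.mem_pyRange_neg_one.mp hc
        omega
      rw [List.filter_filter]
      apply List.filter_congr
      intro p _
      by_cases hpc : key p = c
      · simp [hpc]; omega
      · simp [hpc]

/-- The seen-set/ranked-list loop of A is just `map fst` when the keys are distinct. -/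
theorem fold_ranked (l : List (String × Int)) :
    ∀ (s : PySem.Set String) (r : List String),
      (∀ p ∈ l, p.1 ∉ (s : List String)) → (l.map Prod.fst).Nodup →
      (l.foldl (fun (p : PySem.Set String × List String) kv =>
          if p.1.contains kv.1 then p else (p.1.add kv.1, p.2 ++ [kv.1])) (s, r)).2
        = r ++ l.map Prod.fst := by
  induction l with
  | nil => intro s r _ _; simp
  | cons q t ih =>
    intro s r hmem hnd
    simp only [List.foldl_cons]
    rw [if_neg (by
      have := hmem q (by simp)
      simpa [PySem.Set.contains] using this)]
    rw [ih (s.add q.1) (r ++ [q.1]) (by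
      intro p hp
      have hps : p.1 ∉ (s : List String) := hmem p (by simp [hp])
      have hpq : p.1 ≠ q.1 := by
        simp only [List.map_cons, List.nodup_cons] at hnd
        intro hEq
        exact hnd.1 (hEq ▸ List.mem_map_of_mem hp)
      intro hc
      rcases (PySem.Set.mem_add s q.1 p.1).mp hc with h | h
      · exact hps h
      · exact hpq h) (by simpa using hnd.sublist (by simp))]
    simp

-- ===== VERDICT (by name: the statement is the Claim_ definition above) =====
theorem rank_by_frequency_py_spec : Claim_equal_rank_by_frequency_py := by
  intro items _
  unfold Spec_rank_by_frequency_py rank_by_frequency_py rank_by_frequency_py_alt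
  simp only [PySem.Dict.foldl_insert_getD_add_one_eq_counter]
  by_cases hnil : items = []
  · subst hnil; decide
  · -- the nonempty case
    have hks : (PySem.Dict.counter items).items ≠ [] := by
      cases items with
      | nil => exact absurd rfl hnil
      | cons x t =>
        rw [PySem.Dict.items_counter]
        intro hempty
        have hx := (PySem.Set.mem_ofList (x :: t) x).mpr (by simp)
        rw [List.map_eq_nil_iff.mp hempty] at hx
        simp at hx
    rw [if_neg hks]
    obtain ⟨v, vs, hvals⟩ : ∃ v vs, (PySem.Dict.counter items).values = v :: vs := by
      cases hv : (PySem.Dict.counter items).values with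
      | nil =>
        exact absurd (by simpa [PySem.Dict.values] using hv) hks
      | cons v vs => exact ⟨v, vs, rfl⟩
    rw [hvals, PySem.List.max?_id_cons]
    have hmax : ∀ y ∈ (PySem.Dict.counter items).values, y ≤ vs.foldl max v := by
      intro y hy
      rw [hvals] at hy
      rcases List.mem_cons.mp hy with h | h
      · exact h ▸ (PySem.List.le_foldl_max vs v).1
      · exact (PySem.List.le_foldl_max vs v).2 y h
    have hbound : ∀ p ∈ (PySem.Dict.counter items).items, 0 < p.2 ∧ p.2 ≤ vs.foldl max v := by
      intro p hp
      refine ⟨?_, hmax p.2 (List.mem_map_of_mem hp)⟩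
      rw [PySem.Dict.items_counter] at hp
      obtain ⟨k, hk, rfl⟩ := List.mem_map.mp hp
      have : k ∈ items := (PySem.Set.mem_ofList items k).mp hk
      simp only []
      exact_mod_cast List.count_pos_iff.mpr this
    have hnodup : ((PySem.List.sorted (PySem.Dict.counter items).items (fun kv => kv.2) true).map Prod.fst).Nodup := by
      refine (List.Perm.nodup_iff ((PySem.List.sorted_perm _ _ _).map Prod.fst)).mpr ?_
      have : (PySem.Dict.counter items).items.map Prod.fst = (PySem.Dict.counter items).keys := rfl
      rw [this, PySem.Dict.keys_counter]
      exact PySem.Set.nodup_ofList items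
    rw [fold_ranked _ PySem.Set.empty [] (by intro p _ h; simp [PySem.Set.empty] at h) hnodup,
      List.nil_append]
    rw [sorted_rev_bucket_aux (fun kv => kv.2) 0 ((vs.foldl max v) - 0).toNat (vs.foldl max v)
      (PySem.Dict.counter items).items le_rfl hbound]
    rw [List.map_flatMap, PySem.List.foldl_append_eq_flatMap, List.nil_append]
    refine List.flatMap_congr ?_
    intro c _
    rw [show (List.foldl (fun d p => d.modify p.2 [] fun l => l ++ [p.1]) PySem.Dict.empty
          (PySem.Dict.counter items).items)
        = List.foldl (fun d q => d.modify q.1 [] fun l => l ++ [q.2]) PySem.Dict.empty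
            ((PySem.Dict.counter items).items.map (fun p => (p.2, p.1))) by rw [List.foldl_map]]
    rw [PySem.Dict.getD_foldl_modify_append]
    simp [List.filter_map, Function.comp_def]
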